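-- pv_equiv track=rewrite | github.com/gongzhaopeng/solutions.questions.algoexpert.io | VeryHard/LargestPark_VeryHard/SolutionI_LargestPark_VeryHard.py | largestPark
-- ===== SOURCE A (Python) =====
-- from itertools import chain
--
-- def largestPark(land):
--     max_area, bars, stack = 0, [0] * (len(land[0]) + 1), [(0, -1)]
--     for row in land:
--         for i, occupied in enumerate(chain(row, [True])):
--             bars[i], p_left = 0 if occupied else bars[i] + 1, i
--             while True:
--                 h_park, j = stack[-1]
--                 if h_park > bars[i]:
--                     max_area, p_left = max(max_area, (i - j) * h_park), j
--                     stack.pop()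
--                     continue
--                 if h_park < bars[i]:
--                     stack.append((bars[i], p_left))
--                 break
--     return max_area
-- ===== SOURCE B (Python) =====
-- def largestPark(land):
--     width = len(land[0])
--     heights = [0] * (width + 1)
--     best = 0
--     for row in land:
--         n = len(row)
--         for c in range(n):
--             heights[c] = 0 if row[c] else heights[c] + 1
--         heights[n] = 0
--         for c in range(n):
--             h = heights[c]
--             if h == 0:
--                 continue
--             l = c
--             while l > 0 and heights[l - 1] >= h:
--                 l -= 1
--             r = c
--             while r + 1 < n and heights[r + 1] >= h:
--                 r += 1
--             best = max(best, (r - l + 1) * h)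
--     return best
-- ===== Notes on version B (the rewrite author's own statement) =====
-- stated objective: alternative
-- what changed: A's single interleaved monotonic-stack sweep (heights, stack and areas updated per cell) is replaced by a per-row phase split: update the height buffer for the whole row, then for each column expand left/right over the updated heights to find the maximal rectangle pinned at that column.
import Mathlib
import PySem

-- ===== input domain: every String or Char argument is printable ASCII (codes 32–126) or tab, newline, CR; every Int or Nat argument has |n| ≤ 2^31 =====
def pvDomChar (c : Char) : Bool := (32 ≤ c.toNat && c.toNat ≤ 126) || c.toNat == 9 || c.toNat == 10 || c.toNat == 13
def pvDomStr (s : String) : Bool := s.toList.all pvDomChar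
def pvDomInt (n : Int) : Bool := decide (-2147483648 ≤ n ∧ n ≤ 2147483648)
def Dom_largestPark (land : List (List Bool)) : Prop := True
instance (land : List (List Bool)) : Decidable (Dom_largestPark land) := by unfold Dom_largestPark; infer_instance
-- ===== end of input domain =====

-- B replaces A's single interleaved monotonic-stack sweep by per-row height updates plus an
-- outward left/right extension scan per column (alternative algorithm, similar cost).

-- ===== PORT A =====
-- Python's list-stack is modelled with the top at the HEAD (append/pop act at Python's end).
-- the inner `while True` loop of A: pops entries taller than bars[i], recording areas
def pvPopLoop (i b : Int) : Int → Int → List (Int × Int) → Int × Int × List (Int × Int)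
  | ma, pl, [] => (ma, pl, [])   -- unreachable: the bottom sentinel (0,-1) is never popped
  | ma, pl, (hp, j) :: rest =>
      if b < hp then pvPopLoop i b (max ma ((i - j) * hp)) j rest
      else (ma, pl, (hp, j) :: rest)

-- the `if h_park < bars[i]: stack.append((bars[i], p_left))` exit of the while loop
def pvPush (b pl : Int) (s : List (Int × Int)) : List (Int × Int) :=
  match s with
  | (hp, j) :: rest => if hp < b then (b, pl) :: (hp, j) :: rest else (hp, j) :: rest
  | [] => []

-- body of `for i, occupied in enumerate(chain(row, [True]))`
def pvStepA (st : Int × List Int × List (Int × Int)) (iv : Int × Bool) : Int × List Int × List (Int × Int) :=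
  let b := if iv.2 then 0 else PySem.List.pyGetD st.2.1 iv.1 0 + 1
  let bars := PySem.List.pySetD st.2.1 iv.1 b
  let r := pvPopLoop iv.1 b st.1 iv.1 st.2.2
  (r.1, bars, pvPush b r.2.1 r.2.2)

def largestPark (land : List (List Bool)) : Int :=
  (land.foldl
    (fun st row => (PySem.List.enumerate (row ++ [true])).foldl pvStepA st)
    (0, List.replicate ((land.headD []).length + 1) (0 : Int), [((0 : Int), (-1 : Int))])).1

-- ===== PORT B =====
-- `while l > 0 and heights[l-1] >= h: l -= 1` of Source B, with the lookup abstracted to f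
def Lfun (f : Nat → Int) (h : Int) : Nat → Nat
  | 0 => 0
  | l + 1 => if h ≤ f l then Lfun f h l else l + 1

-- `while r + 1 < n and heights[r+1] >= h: r += 1` of Source B
def Rfun (f : Nat → Int) (h : Int) (n : Nat) (r : Nat) : Nat :=
  if hr : r + 1 < n ∧ h ≤ f (r + 1) then Rfun f h n (r + 1) else r
termination_by n - r
decreasing_by omega

-- `for c in range(n): heights[c] = 0 if row[c] else heights[c] + 1` then `heights[n] = 0`
def pvUpdateRow (hs : List Int) (row : List Bool) : List Int :=
  ((List.range row.length).foldl
    (fun a c => a.set c (if row.getD c false then 0 else a.getD c 0 + 1)) hs).set row.length 0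

-- the per-row scan of Source B: for each column, extend left/right and take the area
def pvRowBest (hs : List Int) (n : Nat) (best0 : Int) : Int :=
  (List.range n).foldl (fun best c =>
    let h := hs.getD c 0
    if h = 0 then best
    else max best (((Rfun (fun t => hs.getD t 0) h n c : Int) -
                    (Lfun (fun t => hs.getD t 0) h c : Int) + 1) * h)) best0

def largestPark_alt (land : List (List Bool)) : Int :=
  (land.foldl (fun st row =>
      let hs := pvUpdateRow st.2 row
      (pvRowBest hs row.length st.1, hs))
    ((0 : Int), List.replicate ((land.headD []).length + 1) (0 : Int))).1

-- ===== PRECONDITION & SPEC =====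
-- Pre_ excludes exactly the inputs on which Python A raises IndexError: an empty grid
-- (`land[0]`) and any row longer than the first row (indexing `bars` past its end).
def Pre_largestPark (land : List (List Bool)) : Prop :=
  land ≠ [] ∧ ∀ row ∈ land, row.length ≤ (land.headD []).length
instance (land : List (List Bool)) : Decidable (Pre_largestPark land) := by
  unfold Pre_largestPark; infer_instance

def pvWitness_largestPark : List (List Bool) := [[false, true], [false, false]]

def Spec_largestPark (land : List (List Bool)) (out : Int) : Prop := out = largestPark_alt land
instance (land : List (List Bool)) (out : Int) : Decidable (Spec_largestPark land out) := by
  unfold Spec_largestPark; infer_instance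

-- ===== CLAIM (what is proved, stated in full; the proofs are below) =====
def Claim_equal_largestPark : Prop :=
  ∀ (land : List (List Bool)), Dom_largestPark land → Pre_largestPark land →
    Spec_largestPark land (largestPark land)

-- ===== LEMMAS AND PROOFS =====

-- maximal-extension area of column c in histogram f (what Source B computes per column)
def cand (f : Nat → Int) (n c : Nat) : Int :=
  ((Rfun f (f c) n c : Int) - (Lfun f (f c) c : Int) + 1) * f c

-- generic form of Source B's per-row fold
def bFold (f : Nat → Int) (N : Nat) (lst : List Nat) (b0 : Int) : Int :=
  lst.foldl (fun best c => if f c = 0 then best else max best (cand f N c)) b0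

-- abstract per-index step of A's stack sweep (height read through f)
def stepH (f : Nat → Int) (st : Int × List (Int × Int)) (i : Nat) : Int × List (Int × Int) :=
  let b := f i
  let r := pvPopLoop (i : Int) b st.1 (i : Int) st.2
  (r.1, pvPush b r.2.1 r.2.2)

def topH (s : List (Int × Int)) : Int := (s.headD (0, -1)).1

-- what a live stack entry (hp, j) means after steps 0..i
def Ent (f : Nat → Int) (i : Nat) (hp j : Int) : Prop :=
  0 < hp ∧ 0 ≤ j ∧ (∃ c : Nat, j ≤ (c : Int) ∧ c ≤ i ∧ f c = hp) ∧
  (∀ t : Nat, j ≤ (t : Int) → t ≤ i → hp ≤ f t)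

inductive Chain (f : Nat → Int) (i : Nat) : List (Int × Int) → Prop
  | bot : Chain f i [(0, -1)]
  | cons (hp j : Int) (rest : List (Int × Int)) :
      Chain f i rest → Ent f i hp j →
      topH rest = (if j = 0 then 0 else f (j - 1).toNat) →
      topH rest < hp →
      Chain f i ((hp, j) :: rest)

def Cov (f : Nat → Int) (n i : Nat) (ma : Int) (s : List (Int × Int)) : Prop :=
  ∀ c : Nat, c ≤ i → 0 < f c →
    ((∀ t : Nat, c < t → t ≤ i → f c ≤ f t) →
      ((f c, ((Lfun f (f c) c : Nat) : Int)) ∈ s ∨ cand f n c ≤ ma)) ∧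
    ((∃ t : Nat, c < t ∧ t ≤ i ∧ f t < f c) → cand f n c ≤ ma)

def MaShape (f : Nat → Int) (n : Nat) (ma0 ma : Int) : Prop :=
  ma0 ≤ ma ∧ (ma = ma0 ∨ ∃ c : Nat, c < n ∧ 0 < f c ∧ ma = cand f n c)

def SInv (f : Nat → Int) (n i : Nat) (ma0 : Int) (st : Int × List (Int × Int)) : Prop :=
  Chain f i st.2 ∧ topH st.2 = f i ∧ Cov f n i st.1 st.2 ∧ MaShape f n ma0 st.1

-- ---- Lfun / Rfun characterization ----
lemma Lfun_eq (f : Nat → Int) (h : Int) (c l : Nat) (hl : l ≤ c)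
    (hcov : ∀ t : Nat, l ≤ t → t < c → h ≤ f t) (hstr : l = 0 ∨ f (l - 1) < h) :
    Lfun f h c = l := by
  induction c with
  | zero =>
    have : l = 0 := by omega
    subst this; rfl
  | succ c ih =>
    by_cases hfc : h ≤ f c
    · have hlc : l ≤ c := by
        rcases Nat.lt_or_ge l (c + 1) with h1 | h1
        · omega
        · exfalso; have hl' : l = c + 1 := by omega
          rcases hstr with h2 | h2
          · omega
          · rw [hl'] at h2; simp at h2; exact absurd hfc (not_le.mpr h2)
      simp only [Lfun, if_pos hfc]
      exact ih hlc (fun t ht1 ht2 => hcov t ht1 (by omega))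
    · simp only [Lfun, if_neg hfc]
      by_contra hne
      have hlc : l ≤ c := by omega
      exact hfc (hcov c hlc (by omega))

lemma Rfun_eq (f : Nat → Int) (h : Int) (n c r : Nat) (hc : c ≤ r) (hr : r < n)
    (hcov : ∀ t : Nat, c < t → t ≤ r → h ≤ f t) (hstr : r + 1 = n ∨ f (r + 1) < h) :
    Rfun f h n c = r := by
  have key : ∀ k c2, c2 ≤ r → r - c2 = k → (∀ t : Nat, c2 < t → t ≤ r → h ≤ f t) →
      Rfun f h n c2 = r := by
    intro k
    induction k with
    | zero =>
      intro c2 hc2 hk _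
      have hcr : c2 = r := by omega
      rw [Rfun]
      have hno : ¬ (c2 + 1 < n ∧ h ≤ f (c2 + 1)) := by
        rintro ⟨h1, h2⟩
        rcases hstr with h3 | h3
        · omega
        · rw [hcr] at h2; exact absurd h2 (not_le.mpr h3)
      rw [dif_neg hno]
      exact hcr
    | succ k ih =>
      intro c2 hc2 hk hcov2
      rw [Rfun]
      have hyes : c2 + 1 < n ∧ h ≤ f (c2 + 1) :=
        ⟨by omega, hcov2 (c2 + 1) (by omega) (by omega)⟩
      rw [dif_pos hyes]
      exact ih (c2 + 1) (by omega) (by omega) (fun t ht1 ht2 => hcov2 t (by omega) ht2)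
  exact key (r - c) c hc rfl hcov

-- ---- bFold facts ----
lemma bFold_cons (f : Nat → Int) (N : Nat) (a : Nat) (lst : List Nat) (b0 : Int) :
    bFold f N (a :: lst) b0 = bFold f N lst (if f a = 0 then b0 else max b0 (cand f N a)) := rfl

lemma bFold_le (f : Nat → Int) (N : Nat) (lst : List Nat) (b0 : Int) :
    b0 ≤ bFold f N lst b0 := by
  induction lst generalizing b0 with
  | nil => simp [bFold]
  | cons a lst ih =>
    rw [bFold_cons]
    refine le_trans ?_ (ih _)
    split
    · exact le_refl _
    · exact le_max_left _ _

lemma bFold_ge_cand (f : Nat → Int) (N : Nat) (lst : List Nat) (b0 : Int)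
    (c : Nat) (hc : c ∈ lst) (hfc : f c ≠ 0) : cand f N c ≤ bFold f N lst b0 := by
  induction lst generalizing b0 with
  | nil => simp at hc
  | cons a lst ih =>
    rw [bFold_cons]
    rcases List.mem_cons.mp hc with rfl | hmem
    · rw [if_neg hfc]
      exact le_trans (le_max_right _ _) (bFold_le f N lst _)
    · exact ih _ hmem

lemma bFold_shape (f : Nat → Int) (N : Nat) (lst : List Nat) (b0 : Int) :
    bFold f N lst b0 = b0 ∨ ∃ c ∈ lst, f c ≠ 0 ∧ bFold f N lst b0 = cand f N c := by
  induction lst generalizing b0 with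
  | nil => left; rfl
  | cons a lst ih =>
    rw [bFold_cons]
    by_cases hfa : f a = 0
    · rw [if_pos hfa]
      rcases ih b0 with h | ⟨c, hc, hfc, he⟩
      · left; exact h
      · right; exact ⟨c, List.mem_cons_of_mem _ hc, hfc, he⟩
    · rw [if_neg hfa]
      rcases ih (max b0 (cand f N a)) with h | ⟨c, hc, hfc, he⟩
      · rcases max_choice b0 (cand f N a) with hm | hm
        · left; rw [h, hm]
        · right; exact ⟨a, List.mem_cons_self, hfa, by rw [h, hm]⟩
      · right; exact ⟨c, List.mem_cons_of_mem _ hc, hfc, he⟩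

-- ---- Chain facts ----
lemma chain_ne_nil {f : Nat → Int} {i : Nat} {s : List (Int × Int)} (h : Chain f i s) :
    s ≠ [] := by
  cases h <;> simp

lemma chain_top_nonneg {f : Nat → Int} {i : Nat} {s : List (Int × Int)} (h : Chain f i s) :
    0 ≤ topH s := by
  cases h with
  | bot => simp [topH]
  | cons hp j rest _ hent _ _ => simpa [topH] using le_of_lt hent.1

lemma chain_le_top {f : Nat → Int} {i : Nat} {s : List (Int × Int)} (h : Chain f i s) :
    ∀ e ∈ s, e.1 ≤ topH s := by
  induction h with
  | bot => intro e he; simp at he; simp [he, topH]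
  | cons hp j rest hrest hent hadj hlt ih =>
    intro e he
    rcases List.mem_cons.mp he with rfl | hmem
    · simp [topH]
    · simp only [topH, List.headD_cons]
      exact le_of_lt (lt_of_le_of_lt (ih e hmem) hlt)

lemma chain_bot {f : Nat → Int} {i : Nat} {s : List (Int × Int)} (h : Chain f i s)
    (h0 : topH s = 0) : s = [(0, -1)] := by
  cases h with
  | bot => rfl
  | cons hp j rest hrest hent hadj hlt =>
    exfalso
    simp only [topH, List.headD_cons] at h0
    have := chain_top_nonneg hrest
    omega

lemma chain_extend {f : Nat → Int} {i : Nat} {s : List (Int × Int)} (h : Chain f i s)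
    (hle : ∀ e ∈ s, e.1 ≤ f (i + 1)) : Chain f (i + 1) s := by
  induction h with
  | bot => exact Chain.bot
  | cons hp j rest hrest hent hadj hlt ih =>
    refine Chain.cons hp j rest (ih (fun e he => hle e (List.mem_cons_of_mem _ he))) ?_ hadj hlt
    obtain ⟨h1, h2, ⟨c, hc1, hc2, hc3⟩, h4⟩ := hent
    refine ⟨h1, h2, ⟨c, hc1, by omega, hc3⟩, ?_⟩
    intro t ht1 ht2
    rcases Nat.lt_or_ge t (i + 1) with ht | ht
    · exact h4 t ht1 (by omega)
    · have : t = i + 1 := by omega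
      rw [this]
      exact hle (hp, j) List.mem_cons_self

-- a popped entry's recorded area is the extension area of its witness column
lemma cand_of_entry (f : Nat → Int) (n : Nat) (i c : Nat) (hp j : Int) (hin : i + 1 ≤ n)
    (hfi : f (i + 1) < hp) (hj0 : 0 ≤ j) (hcj : j ≤ (c : Int)) (hci : c ≤ i) (hfc : f c = hp)
    (hcov : ∀ t : Nat, j ≤ (t : Int) → t ≤ i → hp ≤ f t)
    (hstr : j = 0 ∨ f (j - 1).toNat < hp) :
    cand f n c = (((i + 1 : Nat) : Int) - j) * hp := by
  have hL : Lfun f (f c) c = j.toNat := by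
    rw [hfc]
    refine Lfun_eq f hp c j.toNat (by omega) ?_ ?_
    · intro t ht1 ht2
      exact hcov t (by omega) (by omega)
    · rcases hstr with h1 | h1
      · left; omega
      · right
        have : (j - 1).toNat = j.toNat - 1 := by omega
        rw [← this]; exact h1
  have hR : Rfun f (f c) n c = i := by
    rw [hfc]
    refine Rfun_eq f hp n c i hci (by omega) ?_ (Or.inr hfi)
    intro t ht1 ht2
    exact hcov t (by omega) ht2
  unfold cand
  rw [hL, hR, hfc]
  have : (j.toNat : Int) = j := Int.toNat_of_nonneg hj0
  rw [this]
  push_cast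
  ring

-- ---- the pop loop: full specification ----
lemma pop_spec (f : Nat → Int) (n : Nat) (hf0 : ∀ t, 0 ≤ f t) (i : Nat) (hin : i + 1 ≤ n)
    (b : Int) (hb : f (i + 1) = b) (ma0 : Int) :
    ∀ (s : List (Int × Int)) (ma pl : Int),
      Chain f i s →
      0 ≤ pl → pl ≤ ((i : Int) + 1) →
      topH s = (if pl = 0 then 0 else f (pl - 1).toNat) →
      (∀ t : Nat, pl ≤ (t : Int) → t ≤ i + 1 → b ≤ f t) →
      MaShape f n ma0 ma →
      Cov f n i ma s →
      (ma ≤ (pvPopLoop ((i + 1 : Nat) : Int) b ma pl s).1 ∧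
       MaShape f n ma0 (pvPopLoop ((i + 1 : Nat) : Int) b ma pl s).1 ∧
       Chain f i (pvPopLoop ((i + 1 : Nat) : Int) b ma pl s).2.2 ∧
       topH (pvPopLoop ((i + 1 : Nat) : Int) b ma pl s).2.2 ≤ b ∧
       0 ≤ (pvPopLoop ((i + 1 : Nat) : Int) b ma pl s).2.1 ∧
       (pvPopLoop ((i + 1 : Nat) : Int) b ma pl s).2.1 ≤ ((i : Int) + 1) ∧
       topH (pvPopLoop ((i + 1 : Nat) : Int) b ma pl s).2.2 =
         (if (pvPopLoop ((i + 1 : Nat) : Int) b ma pl s).2.1 = 0 then 0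
          else f ((pvPopLoop ((i + 1 : Nat) : Int) b ma pl s).2.1 - 1).toNat) ∧
       (∀ t : Nat, (pvPopLoop ((i + 1 : Nat) : Int) b ma pl s).2.1 ≤ (t : Int) → t ≤ i + 1 →
         b ≤ f t) ∧
       (∀ e ∈ s, e.1 ≤ b → e ∈ (pvPopLoop ((i + 1 : Nat) : Int) b ma pl s).2.2) ∧
       Cov f n i (pvPopLoop ((i + 1 : Nat) : Int) b ma pl s).1
         (pvPopLoop ((i + 1 : Nat) : Int) b ma pl s).2.2) := by
  intro s ma pl hch
  have hb0 : (0 : Int) ≤ b := hb ▸ hf0 (i + 1)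
  induction hch generalizing ma pl with
  | bot =>
    intro hpl0 hpl1 htop hplcov hms hcov
    have hred : pvPopLoop ((i + 1 : Nat) : Int) b ma pl [(0, -1)] = (ma, pl, [(0, -1)]) := by
      simp only [pvPopLoop]
      rw [if_neg (by omega)]
    rw [hred]
    exact ⟨le_refl _, hms, Chain.bot, by simpa [topH] using hb0, hpl0, hpl1, htop, hplcov,
      fun e he _ => he, hcov⟩
  | cons hp j rest hrest hent hadj hlt ih =>
    intro hpl0 hpl1 htop hplcov hms hcov
    obtain ⟨hppos, hj0, ⟨c0, hc0j, hc0i, hfc0⟩, hcovE⟩ := hent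
    by_cases hbh : b < hp
    · -- pop the top entry (hp, j), recording ((i+1) - j) * hp
      have hstr : j = 0 ∨ f (j - 1).toNat < hp := by
        by_cases hj : j = 0
        · exact Or.inl hj
        · right; rw [hadj, if_neg hj] at hlt; exact hlt
      have hcand0 : cand f n c0 = (((i + 1 : Nat) : Int) - j) * hp :=
        cand_of_entry f n i c0 hp j hin (by rw [hb]; exact hbh) hj0 hc0j hc0i hfc0 hcovE hstr
      have hms2 : MaShape f n ma0 (max ma ((((i + 1 : Nat) : Int) - j) * hp)) := by
        constructor
        · exact le_trans hms.1 (le_max_left _ _)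
        · rcases max_choice ma ((((i + 1 : Nat) : Int) - j) * hp) with hm | hm
          · rw [hm]; exact hms.2
          · right
            exact ⟨c0, by omega, by rw [hfc0]; exact hppos, by rw [hm, ← hcand0]⟩
      have hcov2 : Cov f n i (max ma ((((i + 1 : Nat) : Int) - j) * hp)) rest := by
        intro c hc hfc
        constructor
        · intro hcc
          rcases (hcov c hc hfc).1 hcc with hmem | hle
          · rcases List.mem_cons.mp hmem with heq | hmem2
            · rw [Prod.mk.injEq] at heq
              obtain ⟨hfch, hLj⟩ := heq
              right
              have hRf : Rfun f (f c) n c = i := by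
                refine Rfun_eq f (f c) n c i hc (by omega) ?_
                  (Or.inr (by rw [hb, hfch]; exact hbh))
                intro t ht1 ht2
                exact hcc t ht1 ht2
              have hceq : cand f n c = (((i + 1 : Nat) : Int) - j) * hp := by
                unfold cand
                rw [hRf, hLj, hfch]
                push_cast
                ring
              rw [hceq]
              exact le_max_right _ _
            · left; exact hmem2
          · right; exact le_trans hle (le_max_left _ _)
        · intro hex
          exact le_trans ((hcov c hc hfc).2 hex) (le_max_left _ _)
      have hrec := ih (max ma ((((i + 1 : Nat) : Int) - j) * hp)) j hj0 (by omega) hadj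
        (by
          intro t ht1 ht2
          rcases Nat.lt_or_ge t (i + 1) with ht | ht
          · exact le_trans (le_of_lt hbh) (hcovE t ht1 (by omega))
          · have : t = i + 1 := by omega
            rw [this, hb])
        hms2 hcov2
      have hred : pvPopLoop ((i + 1 : Nat) : Int) b ma pl ((hp, j) :: rest)
          = pvPopLoop ((i + 1 : Nat) : Int) b (max ma ((((i + 1 : Nat) : Int) - j) * hp)) j rest := by
        simp only [pvPopLoop]
        rw [if_pos hbh]
      rw [hred]
      obtain ⟨h1, h2, h3, h4, h5, h6, h7, h8, h9, h10⟩ := hrec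
      refine ⟨le_trans (le_max_left _ _) h1, h2, h3, h4, h5, h6, h7, h8, ?_, h10⟩
      intro e he hle
      rcases List.mem_cons.mp he with rfl | hmem
      · exact absurd hle (by simpa using not_le.mpr hbh)
      · exact h9 e hmem hle
    · -- stop: top not taller than b
      have hred : pvPopLoop ((i + 1 : Nat) : Int) b ma pl ((hp, j) :: rest)
          = (ma, pl, (hp, j) :: rest) := by
        simp only [pvPopLoop]
        rw [if_neg hbh]
      rw [hred]
      exact ⟨le_refl _, hms,
        Chain.cons hp j rest hrest ⟨hppos, hj0, ⟨c0, hc0j, hc0i, hfc0⟩, hcovE⟩ hadj hlt,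
        by simpa [topH] using not_lt.mp hbh, hpl0, hpl1, htop, hplcov, fun e he _ => he, hcov⟩

-- ---- one full step preserves the invariant ----
lemma step_inv (f : Nat → Int) (n : Nat) (hf0 : ∀ t, 0 ≤ f t) (i : Nat) (hin : i + 1 ≤ n)
    (ma0 : Int) (st : Int × List (Int × Int)) (h : SInv f n i ma0 st) :
    SInv f n (i + 1) ma0 (stepH f st (i + 1)) := by
  obtain ⟨hch, htop, hcov, hms⟩ := h
  set r := pvPopLoop ((i + 1 : Nat) : Int) (f (i + 1)) st.1 ((i + 1 : Nat) : Int) st.2 with hr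
  have hpop := pop_spec f n hf0 i hin (f (i + 1)) rfl ma0 st.2 st.1 ((i + 1 : Nat) : Int) hch
    (by omega) (by omega)
    (by
      rw [if_neg (by omega : ¬ ((i + 1 : Nat) : Int) = 0)]
      rw [show ((((i + 1 : Nat) : Int)) - 1).toNat = i by omega]
      exact htop)
    (by
      intro t ht1 ht2
      have : t = i + 1 := by omega
      rw [this])
    hms hcov
  rw [← hr] at hpop
  obtain ⟨h1, h2, h3, h4, h5, h6, h7, h8, h9, h10⟩ := hpop
  have hgoal : stepH f st (i + 1) = (r.1, pvPush (f (i + 1)) r.2.1 r.2.2) := by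
    simp only [stepH, hr]
  rw [hgoal]
  have hchx : Chain f (i + 1) r.2.2 :=
    chain_extend h3 (fun e he => le_trans (chain_le_top h3 e he) h4)
  have hcovsec : ∀ c : Nat, c ≤ i + 1 → 0 < f c →
      (∃ t : Nat, c < t ∧ t ≤ i + 1 ∧ f t < f c) → cand f n c ≤ r.1 := by
    rintro c hc hfc ⟨t, ht1, ht2, ht3⟩
    by_cases hci : c ≤ i
    · by_cases hex : ∃ t', c < t' ∧ t' ≤ i ∧ f t' < f c
      · exact (h10 c hci hfc).2 hex
      · have hcc : ∀ t', c < t' → t' ≤ i → f c ≤ f t' := by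
          intro t' h1' h2'
          by_contra hneg
          exact hex ⟨t', h1', h2', by omega⟩
        rcases (h10 c hci hfc).1 hcc with hmem | hle
        · exfalso
          have hle'' : f c ≤ topH r.2.2 := chain_le_top h3 _ hmem
          have htii : t = i + 1 := by
            by_contra hne
            exact hex ⟨t, ht1, by omega, ht3⟩
          rw [htii] at ht3
          have : f c ≤ f (i + 1) := le_trans hle'' h4
          omega
        · exact hle
    · omega
  have hLgen : ∀ (jv : Int), 0 ≤ jv → jv ≤ ((i : Int) + 1) →
      (∀ t : Nat, jv ≤ (t : Int) → t ≤ i + 1 → f (i + 1) ≤ f t) →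
      (jv = 0 ∨ f (jv - 1).toNat < f (i + 1)) →
      ((Lfun f (f (i + 1)) (i + 1) : Nat) : Int) = jv := by
    intro jv hjv0 hjv1 hcv hstr
    have hL : Lfun f (f (i + 1)) (i + 1) = jv.toNat := by
      refine Lfun_eq f (f (i + 1)) (i + 1) jv.toNat (by omega) ?_ ?_
      · intro t ht1 ht2
        exact hcv t (by omega) (by omega)
      · rcases hstr with hz | hs
        · left; omega
        · right
          rw [show jv.toNat - 1 = (jv - 1).toNat by omega]
          exact hs
    rw [hL]
    omega
  rcases hsplit : r.2.2 with _ | ⟨⟨h2v, j2⟩, rest2⟩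
  · exact absurd hsplit (chain_ne_nil h3)
  · rw [hsplit] at hchx h3 h4 h7 h9 h10
    simp only [topH, List.headD_cons] at h4 h7
    by_cases hpb : h2v < f (i + 1)
    · -- push the new entry (f (i+1), p_left)
      have hpush : pvPush (f (i + 1)) r.2.1 ((h2v, j2) :: rest2)
          = (f (i + 1), r.2.1) :: (h2v, j2) :: rest2 := by
        simp only [pvPush]
        rw [if_pos hpb]
      rw [hpush]
      have htopnn : (0 : Int) ≤ h2v := by
        have := chain_top_nonneg h3
        simpa [topH] using this
      have hfpos : 0 < f (i + 1) := by omega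
      refine ⟨?_, rfl, ?_, h2⟩
      · refine Chain.cons (f (i + 1)) r.2.1 ((h2v, j2) :: rest2) hchx
          ⟨hfpos, h5, ⟨i + 1, by omega, le_refl _, rfl⟩, h8⟩ ?_ ?_
        · simp only [topH, List.headD_cons]
          exact h7
        · simp only [topH, List.headD_cons]
          exact hpb
      · intro c hc hfc
        refine ⟨?_, hcovsec c hc hfc⟩
        intro hcc
        by_cases hci : c ≤ i
        · rcases (h10 c hci hfc).1 (fun t hta htb => hcc t hta (by omega)) with hmem | hle
          · left; exact List.mem_cons_of_mem _ hmem
          · right; exact hle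
        · have hceq : c = i + 1 := by omega
          subst hceq
          left
          have hLj : ((Lfun f (f (i + 1)) (i + 1) : Nat) : Int) = r.2.1 := by
            refine hLgen r.2.1 h5 h6 h8 ?_
            by_cases hz : r.2.1 = 0
            · exact Or.inl hz
            · right
              rw [if_neg hz] at h7
              rw [← h7]
              exact hpb
          rw [hLj]
          exact List.mem_cons_self
    · -- merge: the surviving top already has height f (i+1)
      have hpush : pvPush (f (i + 1)) r.2.1 ((h2v, j2) :: rest2) = (h2v, j2) :: rest2 := by
        simp only [pvPush]
        rw [if_neg hpb]
      rw [hpush]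
      have heqb : h2v = f (i + 1) := le_antisymm h4 (not_lt.mp hpb)
      refine ⟨hchx, by simp [topH, heqb], ?_, h2⟩
      intro c hc hfc
      refine ⟨?_, hcovsec c hc hfc⟩
      intro hcc
      by_cases hci : c ≤ i
      · rcases (h10 c hci hfc).1 (fun t hta htb => hcc t hta (by omega)) with hmem | hle
        · left; exact hmem
        · right; exact hle
      · have hceq : c = i + 1 := by omega
        subst hceq
        left
        cases h3 with
        | bot =>
          exfalso
          rw [← heqb] at hfc
          omega
        | cons hp3 j3 rest3 hrest3 hent3 hadj3 hlt3 =>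
          obtain ⟨hpos2, hj02, ⟨c2, hc2j, hc2i, hfc2⟩, hcov2⟩ := hent3
          have hLj : ((Lfun f (f (i + 1)) (i + 1) : Nat) : Int) = j2 := by
            refine hLgen j2 hj02 (by omega) ?_ ?_
            · intro t ht1 ht2
              rcases Nat.lt_or_ge t (i + 1) with ht | ht
              · rw [← heqb]
                exact hcov2 t ht1 (by omega)
              · rw [show t = i + 1 by omega]
            · by_cases hz : j2 = 0
              · exact Or.inl hz
              · right
                rw [hadj3, if_neg hz, heqb] at hlt3
                exact hlt3
          have hpair : ((f (i + 1) : Int), ((Lfun f (f (i + 1)) (i + 1) : Nat) : Int)) = (h2v, j2) := by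
            rw [hLj, heqb]
          rw [hpair]
          exact List.mem_cons_self

lemma base_inv (f : Nat → Int) (n : Nat) (hf0 : ∀ t, 0 ≤ f t) (ma0 : Int) :
    SInv f n 0 ma0 (stepH f (ma0, [(0, -1)]) 0) := by
  have hb0 : (0 : Int) ≤ f 0 := hf0 0
  have hpop : pvPopLoop ((0 : Nat) : Int) (f 0) ma0 ((0 : Nat) : Int) [(0, -1)]
      = (ma0, ((0 : Nat) : Int), [(0, -1)]) := by
    simp only [pvPopLoop]
    rw [if_neg (by omega)]
  have hstep : stepH f (ma0, [(0, -1)]) 0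
      = (ma0, pvPush (f 0) ((0 : Nat) : Int) [(0, -1)]) := by
    simp only [stepH, hpop]
  rw [hstep]
  by_cases h0 : (0 : Int) < f 0
  · have hpush : pvPush (f 0) ((0 : Nat) : Int) [(0, -1)] = [(f 0, 0), (0, -1)] := by
      simp only [pvPush]
      rw [if_pos h0]
      norm_num
    rw [hpush]
    refine ⟨?_, by simp [topH], ?_, le_refl _, Or.inl rfl⟩
    · refine Chain.cons (f 0) 0 [(0, -1)] Chain.bot ⟨h0, le_refl 0, ⟨0, by simp, le_refl 0, rfl⟩, ?_⟩ (by simp [topH]) (by simpa [topH] using h0)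
      intro t _ ht
      have : t = 0 := by omega
      rw [this]
    · intro c hc hfc
      have hc0 : c = 0 := by omega
      subst hc0
      constructor
      · intro _
        left
        have hL : Lfun f (f 0) 0 = 0 := rfl
        rw [hL]
        simp
      · rintro ⟨t, ht1, ht2, _⟩; omega
  · have hf00 : f 0 = 0 := by omega
    have hpush : pvPush (f 0) ((0 : Nat) : Int) [(0, -1)] = [(0, -1)] := by
      simp only [pvPush]
      rw [if_neg (by omega)]
    rw [hpush]
    refine ⟨Chain.bot, by simp [topH, hf00], ?_, le_refl _, Or.inl rfl⟩
    intro c hc hfc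
    have hc0 : c = 0 := by omega
    subst hc0
    omega

lemma inv_fold (f : Nat → Int) (n : Nat) (hf0 : ∀ t, 0 ≤ f t) (ma0 : Int) :
    ∀ k, k ≤ n → SInv f n k ma0 ((List.range (k + 1)).foldl (stepH f) (ma0, [(0, -1)])) := by
  intro k
  induction k with
  | zero =>
    intro _
    simpa [List.range_one] using base_inv f n hf0 ma0
  | succ k ih =>
    intro hk
    rw [List.range_succ, List.foldl_append, List.foldl_cons, List.foldl_nil]
    exact step_inv f n hf0 k hk ma0 _ (ih (by omega))

-- ---- the row theorem: A's sweep equals B's per-column scan ----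
lemma rowEq (f : Nat → Int) (n : Nat) (hf0 : ∀ t, 0 ≤ f t) (hfn : f n = 0) (ma0 : Int) :
    (List.range (n + 1)).foldl (stepH f) (ma0, [(0, -1)])
      = (bFold f n (List.range n) ma0, [(0, -1)]) := by
  obtain ⟨hch, htop, hcov, hms⟩ := inv_fold f n hf0 ma0 n le_rfl
  set st := (List.range (n + 1)).foldl (stepH f) (ma0, [((0 : Int), (-1 : Int))]) with hst
  have hs2 : st.2 = [(0, -1)] := chain_bot hch (by rw [htop, hfn])
  have h1 : st.1 = bFold f n (List.range n) ma0 := by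
    apply le_antisymm
    · rcases hms.2 with h | ⟨c, hcn, hfc, he⟩
      · rw [h]; exact bFold_le f n _ ma0
      · rw [he]
        exact bFold_ge_cand f n _ ma0 c (List.mem_range.mpr hcn) (by omega)
    · rcases bFold_shape f n (List.range n) ma0 with h | ⟨c, hc, hfc, he⟩
      · rw [h]; exact hms.1
      · rw [he]
        have hcn : c < n := List.mem_range.mp hc
        have hfcpos : 0 < f c := lt_of_le_of_ne (hf0 c) (Ne.symm hfc)
        exact (hcov c (by omega) hfcpos).2 ⟨n, hcn, le_rfl, by rw [hfn]; exact hfcpos⟩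
  rw [Prod.ext_iff]
  exact ⟨h1, hs2⟩

-- ---- bridging port A's row fold to the abstract machine ----
def updSeq : List Int → List Bool → Nat → List Int
  | bars, [], _ => bars
  | bars, x :: xs, k => updSeq (bars.set k (if x then 0 else bars.getD k 0 + 1)) xs (k + 1)

lemma updSeq_length (xs : List Bool) : ∀ (bars : List Int) (k : Nat),
    (updSeq bars xs k).length = bars.length := by
  induction xs with
  | nil => intro bars k; rfl
  | cons x xs ih => intro bars k; simp [updSeq, ih]

lemma updSeq_getD_lt (xs : List Bool) : ∀ (bars : List Int) (k t : Nat), t < k →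
    (updSeq bars xs k).getD t 0 = bars.getD t 0 := by
  induction xs with
  | nil => intro bars k t _; rfl
  | cons x xs ih =>
    intro bars k t ht
    simp only [updSeq]
    rw [ih _ (k + 1) t (by omega)]
    simp [List.getD_eq_getElem?_getD, List.getElem?_set_ne (by omega : k ≠ t)]

lemma getD_nonneg (l : List Int) (h : ∀ v ∈ l, 0 ≤ v) (t : Nat) : 0 ≤ l.getD t 0 := by
  rcases Nat.lt_or_ge t l.length with ht | ht
  · rw [List.getD_eq_getElem l 0 ht]; exact h _ (List.getElem_mem ht)
  · rw [List.getD_eq_default l 0 ht]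

lemma updSeq_nonneg (xs : List Bool) : ∀ (bars : List Int) (k : Nat),
    (∀ v ∈ bars, 0 ≤ v) → ∀ v ∈ updSeq bars xs k, 0 ≤ v := by
  induction xs with
  | nil => intro bars k h; exact h
  | cons x xs ih =>
    intro bars k h
    refine ih _ (k + 1) ?_
    intro v hv
    rcases List.mem_or_eq_of_mem_set hv with hv' | rfl
    · exact h v hv'
    · split
      · exact le_refl 0
      · have := getD_nonneg bars h k; omega

lemma genA (xs : List Bool) : ∀ (k : Nat) (bars : List Int) (ma : Int)
    (s : List (Int × Int)), k + xs.length ≤ bars.length →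
    (PySem.List.enumerate xs (k : Int)).foldl pvStepA (ma, bars, s)
      = (((List.range' k xs.length).foldl (stepH (fun t => (updSeq bars xs k).getD t 0)) (ma, s)).1,
         updSeq bars xs k,
         ((List.range' k xs.length).foldl (stepH (fun t => (updSeq bars xs k).getD t 0)) (ma, s)).2) := by
  induction xs with
  | nil =>
    intro k bars ma s _
    simp [PySem.List.enumerate_nil, updSeq]
  | cons x xs ih =>
    intro k bars ma s hk
    have hklt : k < bars.length := by simp at hk; omega
    have hstep : pvStepA (ma, bars, s) ((k : Int), x)
        = ((pvPopLoop (k : Int) (if x then 0 else bars.getD k 0 + 1) ma (k : Int) s).1,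
           bars.set k (if x then 0 else bars.getD k 0 + 1),
           pvPush (if x then 0 else bars.getD k 0 + 1)
             (pvPopLoop (k : Int) (if x then 0 else bars.getD k 0 + 1) ma (k : Int) s).2.1
             (pvPopLoop (k : Int) (if x then 0 else bars.getD k 0 + 1) ma (k : Int) s).2.2) := by
      simp only [pvStepA, PySem.List.pyGetD_natCast, PySem.List.pySetD_natCast]
    have hFk : (updSeq (bars.set k (if x then 0 else bars.getD k 0 + 1)) xs (k + 1)).getD k 0
        = (if x then 0 else bars.getD k 0 + 1) := by
      rw [updSeq_getD_lt xs _ (k + 1) k (by omega)]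
      simp [List.getD_eq_getElem?_getD, hklt]
    rw [PySem.List.enumerate_cons, List.foldl_cons, hstep]
    have hcast : ((k : Int) + 1) = (((k + 1 : Nat)) : Int) := by push_cast; ring
    rw [hcast, ih (k + 1) _ _ _ (by rw [List.length_set]; simp at hk ⊢; omega)]
    simp only [updSeq, List.length_cons]
    rw [List.range'_succ, List.foldl_cons]
    have hstepH : stepH (fun t => (updSeq (bars.set k (if x then 0 else bars.getD k 0 + 1)) xs (k + 1)).getD t 0) (ma, s) k
        = ((pvPopLoop (k : Int) (if x then 0 else bars.getD k 0 + 1) ma (k : Int) s).1,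
           pvPush (if x then 0 else bars.getD k 0 + 1)
             (pvPopLoop (k : Int) (if x then 0 else bars.getD k 0 + 1) ma (k : Int) s).2.1
             (pvPopLoop (k : Int) (if x then 0 else bars.getD k 0 + 1) ma (k : Int) s).2.2) := by
      simp only [stepH, hFk]
    rw [hstepH]

lemma updSeq_append (xs ys : List Bool) : ∀ (bars : List Int) (k : Nat),
    updSeq bars (xs ++ ys) k = updSeq (updSeq bars xs k) ys (k + xs.length) := by
  induction xs with
  | nil => intro bars k; simp [updSeq]
  | cons x xs ih =>
    intro bars k
    simp only [List.cons_append, updSeq]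
    rw [ih]
    congr 1
    simp [List.length_cons]
    omega

lemma updSeq_eq_fold (xs : List Bool) : ∀ (k : Nat) (bars : List Int),
    updSeq bars xs k = (List.range xs.length).foldl
      (fun a j => a.set (k + j) (if xs.getD j false then 0 else a.getD (k + j) 0 + 1)) bars := by
  induction xs with
  | nil => intro k bars; rfl
  | cons x xs ih =>
    intro k bars
    rw [List.length_cons, List.range_succ_eq_map]
    simp only [List.foldl_cons, List.foldl_map, Nat.add_zero, List.getD_cons_zero]
    rw [updSeq, ih (k + 1)]
    congr 1
    funext a j
    simp only [List.getD_cons_succ]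
    have hkj : k + (j + 1) = (k + 1) + j := by omega
    rw [← hkj]

lemma pvUpdateRow_eq (bars : List Int) (row : List Bool) :
    pvUpdateRow bars row = updSeq bars (row ++ [true]) 0 := by
  rw [updSeq_append]
  simp only [updSeq, Nat.zero_add, if_pos]
  rw [pvUpdateRow, updSeq_eq_fold]
  simp

lemma pvUpdateRow_length (bars : List Int) (row : List Bool) :
    (pvUpdateRow bars row).length = bars.length := by
  rw [pvUpdateRow_eq, updSeq_length]

lemma pvUpdateRow_nonneg (bars : List Int) (row : List Bool) (h : ∀ v ∈ bars, 0 ≤ v) :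
    ∀ v ∈ pvUpdateRow bars row, 0 ≤ v := by
  rw [pvUpdateRow_eq]
  exact updSeq_nonneg _ _ _ h

lemma pvUpdateRow_getD_last (bars : List Int) (row : List Bool)
    (h : row.length < bars.length) : (pvUpdateRow bars row).getD row.length 0 = 0 := by
  rw [pvUpdateRow_eq, updSeq_append]
  simp only [updSeq, Nat.zero_add]
  have hlen : row.length < (updSeq bars row 0).length := by rw [updSeq_length]; exact h
  simp [List.getD_eq_getElem?_getD, hlen]

lemma pvRowBest_eq (hs : List Int) (n : Nat) (b0 : Int) :
    pvRowBest hs n b0 = bFold (fun t => hs.getD t 0) n (List.range n) b0 := rfl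

-- ---- the whole-grid fold ----
lemma land_fold (rows : List (List Bool)) : ∀ (W : Nat) (ma : Int) (bars : List Int),
    bars.length = W + 1 → (∀ v ∈ bars, 0 ≤ v) → (∀ r ∈ rows, r.length ≤ W) →
    rows.foldl (fun st row => (PySem.List.enumerate (row ++ [true])).foldl pvStepA st)
        (ma, bars, [((0 : Int), (-1 : Int))])
      = ((rows.foldl (fun st row =>
            let hs := pvUpdateRow st.2 row
            (pvRowBest hs row.length st.1, hs)) (ma, bars)).1,
         (rows.foldl (fun st row =>
            let hs := pvUpdateRow st.2 row
            (pvRowBest hs row.length st.1, hs)) (ma, bars)).2,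
         [((0 : Int), (-1 : Int))]) := by
  induction rows with
  | nil => intro W ma bars _ _ _; rfl
  | cons row rows ih =>
    intro W ma bars hlen hnn hrow
    simp only [List.foldl_cons]
    have hL : row.length ≤ W := hrow row List.mem_cons_self
    have hk : 0 + (row ++ [true]).length ≤ bars.length := by
      simp [hlen, List.length_append]; omega
    have hgen := genA (row ++ [true]) 0 bars ma [((0 : Int), (-1 : Int))] hk
    simp only [Nat.cast_zero] at hgen
    rw [hgen, ← pvUpdateRow_eq]
    have hrange : List.range' 0 (row ++ [true]).length = List.range (row.length + 1) := by
      rw [List.length_append, List.length_singleton, ← List.range_eq_range']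
    rw [hrange]
    have hrow_eq := rowEq (fun t => (pvUpdateRow bars row).getD t 0) row.length
      (fun t => getD_nonneg _ (pvUpdateRow_nonneg bars row hnn) t)
      (pvUpdateRow_getD_last bars row (by omega)) ma
    rw [hrow_eq, ← pvRowBest_eq]
    exact ih W (pvRowBest (pvUpdateRow bars row) row.length ma) (pvUpdateRow bars row)
      (by rw [pvUpdateRow_length]; exact hlen)
      (pvUpdateRow_nonneg bars row hnn)
      (fun r hr => hrow r (List.mem_cons_of_mem _ hr))

-- ===== VERDICT (by name: the statement is the Claim_ definition above) =====
theorem largestPark_spec : Claim_equal_largestPark := by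
  intro land _ hpre
  unfold Spec_largestPark largestPark largestPark_alt
  have h := land_fold land (land.headD []).length 0
    (List.replicate ((land.headD []).length + 1) (0 : Int))
    (by simp) (by intro v hv; simp at hv; omega) (fun r hr => hpre.2 r hr)
  rw [h]
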